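-- pv_equiv track=rewrite | github.com/alambrow/whiteboarding_exercises | highest_and_lowest.py | highest_and_lowest
-- ===== SOURCE A (Python) =====
-- def highest_and_lowest(string_o_numbers):
--     parsed_string = string_o_numbers.split(" ")
--     numberlist = []
--     for string in parsed_string:
--         numberlist.append(int(string))
--     maximum = max(numberlist)
--     minimum = min(numberlist)
--     return { 'highest': maximum, 'lowest': minimum }
-- ===== SOURCE B (Python) =====
-- def highest_and_lowest(string_o_numbers):
--     highest = None
--     lowest = None
--     for tok in string_o_numbers.split(" "):
--         n = int(tok)
--         if highest is None:
--             highest = n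
--             lowest = n
--         else:
--             if n > highest:
--                 highest = n
--             if n < lowest:
--                 lowest = n
--     return {'highest': highest, 'lowest': lowest}
-- ===== Notes on version B (the rewrite author's own statement) =====
-- stated objective: simpler
-- what changed: B drops the intermediate number list and the separate max()/min() passes: one loop over the tokens parses each and updates two running variables highest/lowest.
import Mathlib
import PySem

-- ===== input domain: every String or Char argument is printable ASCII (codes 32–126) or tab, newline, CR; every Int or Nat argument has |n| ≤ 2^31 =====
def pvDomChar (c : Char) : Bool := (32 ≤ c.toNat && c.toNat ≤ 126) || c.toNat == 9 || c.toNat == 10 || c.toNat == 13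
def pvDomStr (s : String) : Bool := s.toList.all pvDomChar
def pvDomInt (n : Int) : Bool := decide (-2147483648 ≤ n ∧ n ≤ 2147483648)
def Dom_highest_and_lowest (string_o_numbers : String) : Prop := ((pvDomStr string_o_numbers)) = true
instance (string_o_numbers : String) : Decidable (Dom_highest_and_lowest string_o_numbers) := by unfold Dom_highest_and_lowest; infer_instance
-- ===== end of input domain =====

-- B replaces A's build-a-list-then-max-then-min (three passes, extra list) with one
-- parsing loop maintaining running highest/lowest variables (objective: simpler).

-- ===== PORT A =====
-- the 'for string in parsed_string: numberlist.append(int(string))' loop;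
-- none = a ValueError from int()
def pvParseLoop : List String → List Int → Option (List Int)
  | [], acc => some acc
  | t :: ts, acc =>
    match PySem.Int.ofStr? t with
    | none => none
    | some n => pvParseLoop ts (acc ++ [n])

def highest_and_lowest (string_o_numbers : String) : List (String × Int) :=
  let parsed_string := (PySem.Str.split? string_o_numbers " ").getD []
  match pvParseLoop parsed_string [] with
  | none => []  -- int() raised ValueError; excluded by Pre_
  | some numberlist =>
    match PySem.List.max? numberlist (fun x => x), PySem.List.min? numberlist (fun x => x) with
    | some maximum, some minimum => [("highest", maximum), ("lowest", minimum)]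
    | _, _ => []  -- max()/min() on empty list (unreachable: split never returns [])

-- ===== PORT B =====
-- single pass: state = none before the first token, some (highest, lowest) after;
-- outer none = a ValueError from int()
def pvAltLoop : List String → Option (Int × Int) → Option (Option (Int × Int))
  | [], st => some st
  | t :: ts, st =>
    match PySem.Int.ofStr? t with
    | none => none
    | some n =>
      match st with
      | none => pvAltLoop ts (some (n, n))
      | some (highest, lowest) =>
          pvAltLoop ts (some ((if n > highest then n else highest),
                              (if n < lowest then n else lowest)))

def highest_and_lowest_alt (string_o_numbers : String) : List (String × Int) :=
  match pvAltLoop ((PySem.Str.split? string_o_numbers " ").getD []) none with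
  | none => []          -- int() raised ValueError; excluded by Pre_
  | some st =>
    match st with
    | none => []        -- no token at all (unreachable: split never returns [])
    | some (highest, lowest) => [("highest", highest), ("lowest", lowest)]

-- ===== PRECONDITION & SPEC =====
-- Pre_: every token of string_o_numbers.split(" ") is accepted by int();
-- otherwise A raises ValueError (e.g. on "-5 8 x" or on "" / "1  2", whose split has a non-int token).
def Pre_highest_and_lowest (string_o_numbers : String) : Prop :=
  ∀ t ∈ (PySem.Str.split? string_o_numbers " ").getD [],
    (PySem.Int.ofStr? t).isSome = true
instance (string_o_numbers : String) : Decidable (Pre_highest_and_lowest string_o_numbers) := by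
  unfold Pre_highest_and_lowest; infer_instance

def pvWitness_highest_and_lowest : String := "103 -250 47 98 62 -7 1000"

def Spec_highest_and_lowest (string_o_numbers : String) (out : List (String × Int)) : Prop :=
  out = highest_and_lowest_alt string_o_numbers
instance (string_o_numbers : String) (out : List (String × Int)) : Decidable (Spec_highest_and_lowest string_o_numbers out) := by
  unfold Spec_highest_and_lowest; infer_instance

-- ===== CLAIM =====
def Claim_equal_highest_and_lowest : Prop := ∀ (string_o_numbers : String), Dom_highest_and_lowest string_o_numbers → Pre_highest_and_lowest string_o_numbers → Spec_highest_and_lowest string_o_numbers (highest_and_lowest string_o_numbers)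

-- ===== LEMMAS AND PROOFS =====

theorem pvParseLoop_all_some (ts : List String) (acc : List Int)
    (h : ∀ t ∈ ts, (PySem.Int.ofStr? t).isSome = true) :
    pvParseLoop ts acc = some (acc ++ ts.filterMap PySem.Int.ofStr?) := by
  induction ts generalizing acc with
  | nil => simp [pvParseLoop]
  | cons t ts ih =>
    have ht := h t (by simp)
    obtain ⟨n, hn⟩ := Option.isSome_iff_exists.mp ht
    simp only [pvParseLoop, hn, List.filterMap_cons]
    rw [ih _ (fun x hx => h x (by simp [hx]))]
    simp

theorem pvAltLoop_all_some (ts : List String) (hi lo : Int)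
    (h : ∀ t ∈ ts, (PySem.Int.ofStr? t).isSome = true) :
    pvAltLoop ts (some (hi, lo)) =
      some (some ((ts.filterMap PySem.Int.ofStr?).foldl max hi,
                  (ts.filterMap PySem.Int.ofStr?).foldl min lo)) := by
  induction ts generalizing hi lo with
  | nil => simp [pvAltLoop]
  | cons t ts ih =>
    have ht := h t (by simp)
    obtain ⟨n, hn⟩ := Option.isSome_iff_exists.mp ht
    simp only [pvAltLoop, hn, List.filterMap_cons]
    rw [ih _ _ (fun x hx => h x (by simp [hx]))]
    have hmax : (if n > hi then n else hi) = max hi n := by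
      simp [max_def]; split_ifs <;> omega
    have hmin : (if n < lo then n else lo) = min lo n := by
      simp [min_def]; split_ifs <;> omega
    simp [hmax, hmin]

theorem pvMain (toks : List String)
    (hpre : ∀ t ∈ toks, (PySem.Int.ofStr? t).isSome = true) :
    (match pvParseLoop toks [] with
      | none => ([] : List (String × Int))
      | some numberlist =>
        match PySem.List.max? numberlist (fun x => x), PySem.List.min? numberlist (fun x => x) with
        | some maximum, some minimum => [("highest", maximum), ("lowest", minimum)]
        | _, _ => []) =
    (match pvAltLoop toks none with
      | none => ([] : List (String × Int))
      | some st =>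
        match st with
        | none => []
        | some (highest, lowest) => [("highest", highest), ("lowest", lowest)]) := by
  rw [pvParseLoop_all_some toks [] hpre]
  cases htc : toks with
  | nil => simp [pvAltLoop, PySem.List.max?]
  | cons t ts =>
    subst htc
    have ht := hpre t (by simp)
    obtain ⟨n, hn⟩ := Option.isSome_iff_exists.mp ht
    have hts : ∀ x ∈ ts, (PySem.Int.ofStr? x).isSome = true := by
      intro x hx; exact hpre x (by simp [hx])
    simp only [pvAltLoop, hn, List.filterMap_cons, List.nil_append]
    rw [pvAltLoop_all_some ts n n hts,
        PySem.List.max?_id_cons, PySem.List.min?_id_cons]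

-- ===== VERDICT =====
theorem highest_and_lowest_spec : Claim_equal_highest_and_lowest := by
  intro s _ hpre
  exact pvMain _ hpre
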